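-- pv_equiv track=rewrite | github.com/RuGus/Netology_diplom_2 | vk/vk_tools.py | get_best_size_url
-- ===== SOURCE A (Python) =====
-- def get_best_size_url(sizes):
--     """Получение фотографии с лучшим размером.
--
--     Args:
--         sizes (dict): Словарь с размерами фото из ВК.
--
--     Returns:
--         str: Ссылка на фото.
--     """
--     best_size_photo_url = None
--     sizes_dict = {}
--     for size in sizes:
--         sizes_dict[size["type"]] = size["url"]
--     if sizes_dict:
--         best_size_photo_url = sizes_dict[max(sizes_dict.keys())]
--     return best_size_photo_url
-- ===== SOURCE B (Python) =====
-- def get_best_size_url(sizes):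
--     """Single pass keeping the best (max-type, last-wins) entry; no dict, no max()."""
--     best_type = None
--     best_url = None
--     for size in sizes:
--         t = size["type"]
--         if best_type is None or t >= best_type:
--             best_type = t
--             best_url = size["url"]
--     return best_url
-- ===== Notes on version B (the rewrite author's own statement) =====
-- stated objective: simpler
-- what changed: Replaces the dict-build-then-max-over-keys pass with a single running-maximum loop keeping best_type/best_url (>= so the last entry among equal max types wins, like dict overwrite).
import Mathlib
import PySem

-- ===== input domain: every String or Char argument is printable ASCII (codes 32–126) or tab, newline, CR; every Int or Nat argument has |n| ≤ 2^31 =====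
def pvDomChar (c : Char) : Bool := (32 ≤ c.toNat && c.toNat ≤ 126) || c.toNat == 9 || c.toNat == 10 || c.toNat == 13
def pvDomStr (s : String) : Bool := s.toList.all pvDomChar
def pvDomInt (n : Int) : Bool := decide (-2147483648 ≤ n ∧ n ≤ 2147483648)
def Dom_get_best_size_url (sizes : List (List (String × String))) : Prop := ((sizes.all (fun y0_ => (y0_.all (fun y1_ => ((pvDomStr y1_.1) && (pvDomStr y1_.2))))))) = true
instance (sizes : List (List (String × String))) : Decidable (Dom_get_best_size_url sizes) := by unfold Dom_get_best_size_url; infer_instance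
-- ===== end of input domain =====

-- B replaces A's dict-build-then-max-over-keys with one running-maximum pass (same cost, simpler).

-- ===== PORT A =====
-- size["type"] / size["url"] on the inner dict: first-match lookup; total via getD "" under Pre_.
def get_best_size_url (sizes : List (List (String × String))) : Option String :=
  let sizes_dict := sizes.foldl
    (fun d size =>
      PySem.Dict.insert d ((PySem.Dict.get? (PySem.Dict.mk size) "type").getD "")
        ((PySem.Dict.get? (PySem.Dict.mk size) "url").getD ""))
    PySem.Dict.empty
  if PySem.Dict.keys sizes_dict ≠ [] then
    match PySem.List.max? (PySem.Dict.keys sizes_dict) (fun k => k) with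
    | some k => PySem.Dict.get? sizes_dict k
    | none => none
  else none

-- ===== PORT B =====
def get_best_size_url_alt (sizes : List (List (String × String))) : Option String :=
  (sizes.foldl
    (fun best size =>
      let t := (PySem.Dict.get? (PySem.Dict.mk size) "type").getD ""
      match best with
      | none => some (t, (PySem.Dict.get? (PySem.Dict.mk size) "url").getD "")
      | some (bt, bu) =>
          if bt ≤ t then some (t, (PySem.Dict.get? (PySem.Dict.mk size) "url").getD "")
          else some (bt, bu))
    none).map Prod.snd

-- ===== PRECONDITION & SPEC =====
-- Pre_ excludes exactly the inputs where A raises KeyError: an entry missing the "type" or "url" key.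
def Pre_get_best_size_url (sizes : List (List (String × String))) : Prop :=
  ∀ size ∈ sizes, (PySem.Dict.get? (PySem.Dict.mk size) "type").isSome ∧
    (PySem.Dict.get? (PySem.Dict.mk size) "url").isSome
instance (sizes : List (List (String × String))) : Decidable (Pre_get_best_size_url sizes) := by
  unfold Pre_get_best_size_url; infer_instance
def pvWitness_get_best_size_url : (List (List (String × String))) :=
  [[("type", "x"), ("url", "u1")], [("type", "x"), ("url", "u2")]]
def Spec_get_best_size_url (sizes : List (List (String × String))) (out : Option String) : Prop := out = get_best_size_url_alt sizes
instance (sizes : List (List (String × String))) (out : Option String) : Decidable (Spec_get_best_size_url sizes out) := by unfold Spec_get_best_size_url; infer_instance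

-- ===== CLAIM (what is proved, stated in full; the proofs are below) =====
def Claim_equal_get_best_size_url : Prop := ∀ (sizes : List (List (String × String))), Dom_get_best_size_url sizes → Pre_get_best_size_url sizes → Spec_get_best_size_url sizes (get_best_size_url sizes)

-- ===== LEMMAS AND PROOFS =====

-- Invariant tying A's dict state to B's running best.
def pvInv (d : PySem.Dict String String) (best : Option (String × String)) : Prop :=
  (PySem.Dict.keys d).Nodup ∧
  match best with
  | none => PySem.Dict.keys d = []
  | some (bt, bu) =>
      bt ∈ PySem.Dict.keys d ∧ PySem.Dict.get? d bt = some bu ∧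
      ∀ k ∈ PySem.Dict.keys d, k ≤ bt

def pvStepB (best : Option (String × String)) (t u : String) : Option (String × String) :=
  match best with
  | none => some (t, u)
  | some (bt, bu) => if bt ≤ t then some (t, u) else some (bt, bu)

theorem pvInv_step (d : PySem.Dict String String) (best : Option (String × String))
    (t u : String) (h : pvInv d best) :
    pvInv (PySem.Dict.insert d t u) (pvStepB best t u) := by
  obtain ⟨hnd, hb⟩ := h
  refine ⟨PySem.Dict.nodup_keys_insert d t u hnd, ?_⟩
  match best with
  | none =>
      have hkeys : PySem.Dict.keys d = [] := hb
      unfold pvStepB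
      refine ⟨?_, PySem.Dict.get?_insert_self d t u, ?_⟩
      · exact (PySem.Dict.mem_keys_insert d t t u).mpr (Or.inl rfl)
      · intro k hk
        rcases (PySem.Dict.mem_keys_insert d t k u).mp hk with h1 | h2
        · exact le_of_eq h1
        · rw [hkeys] at h2; cases h2
  | some (bt, bu) =>
      obtain ⟨hmem, hget, hmax⟩ := hb
      unfold pvStepB
      by_cases hle : bt ≤ t
      · simp only [if_pos hle]
        refine ⟨(PySem.Dict.mem_keys_insert d t t u).mpr (Or.inl rfl),
          PySem.Dict.get?_insert_self d t u, ?_⟩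
        intro k hk
        rcases (PySem.Dict.mem_keys_insert d t k u).mp hk with h1 | h2
        · exact le_of_eq h1
        · exact le_trans (hmax k h2) hle
      · simp only [if_neg hle]
        have hne : bt ≠ t := fun he => hle (le_of_eq he)
        refine ⟨(PySem.Dict.mem_keys_insert d t bt u).mpr (Or.inr hmem), ?_, ?_⟩
        · rw [PySem.Dict.get?_insert, if_neg hne]; exact hget
        · intro k hk
          rcases (PySem.Dict.mem_keys_insert d t k u).mp hk with h1 | h2
          · subst h1; exact le_of_not_ge hle
          · exact hmax k h2

theorem pvInv_final (d : PySem.Dict String String) (best : Option (String × String))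
    (h : pvInv d best) :
    (if PySem.Dict.keys d ≠ [] then
      match PySem.List.max? (PySem.Dict.keys d) (fun k => k) with
      | some k => PySem.Dict.get? d k
      | none => none
     else none) = best.map Prod.snd := by
  obtain ⟨_, hb⟩ := h
  match best with
  | none => simp [hb]
  | some (bt, bu) =>
      obtain ⟨hmem, hget, hmax⟩ := hb
      have hne : PySem.Dict.keys d ≠ [] := by
        intro he; rw [he] at hmem; cases hmem
      rw [if_pos hne]
      cases hm : PySem.List.max? (PySem.Dict.keys d) (fun k => k) with
      | none => exact absurd (by rwa [PySem.List.max?_eq_none_iff] at hm) hne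
      | some m =>
          have hmmem := PySem.List.max?_mem hm
          have hmle : bt ≤ m := PySem.List.max?_isMax hm bt hmem
          have : m = bt := le_antisymm (hmax m hmmem) hmle
          subst this
          simp [hget]

theorem pvFold_eq (sizes : List (List (String × String)))
    (d : PySem.Dict String String) (best : Option (String × String)) (h : pvInv d best) :
    (if PySem.Dict.keys (sizes.foldl
        (fun d size =>
          PySem.Dict.insert d ((PySem.Dict.get? (PySem.Dict.mk size) "type").getD "")
            ((PySem.Dict.get? (PySem.Dict.mk size) "url").getD "")) d) ≠ [] then
      match PySem.List.max? (PySem.Dict.keys (sizes.foldl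
        (fun d size =>
          PySem.Dict.insert d ((PySem.Dict.get? (PySem.Dict.mk size) "type").getD "")
            ((PySem.Dict.get? (PySem.Dict.mk size) "url").getD "")) d)) (fun k => k) with
      | some k => PySem.Dict.get? (sizes.foldl
          (fun d size =>
            PySem.Dict.insert d ((PySem.Dict.get? (PySem.Dict.mk size) "type").getD "")
              ((PySem.Dict.get? (PySem.Dict.mk size) "url").getD "")) d) k
      | none => none
     else none)
    = ((sizes.foldl
        (fun best size =>
          let t := (PySem.Dict.get? (PySem.Dict.mk size) "type").getD ""
          match best with
          | none => some (t, (PySem.Dict.get? (PySem.Dict.mk size) "url").getD "")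
          | some (bt, bu) =>
              if bt ≤ t then some (t, (PySem.Dict.get? (PySem.Dict.mk size) "url").getD "")
              else some (bt, bu)) best)).map Prod.snd := by
  induction sizes generalizing d best with
  | nil => simpa using pvInv_final d best h
  | cons s rest ih =>
      simp only [List.foldl_cons]
      exact ih _ _ (pvInv_step d best _ _ h)

-- ===== VERDICT (by name: the statement is the Claim_ definition above) =====
theorem get_best_size_url_spec : Claim_equal_get_best_size_url := by
  intro sizes _ _
  unfold Spec_get_best_size_url get_best_size_url get_best_size_url_alt
  exact pvFold_eq sizes PySem.Dict.empty none
    ⟨by simp,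
     by simp [PySem.Dict.keys_empty]⟩
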